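-- pv_equiv track=rewrite | github.com/JanLikar/aoc2022-25-in-25 | 09/extras/solution.py | count_visited_squares
-- ===== SOURCE A (Python) =====
-- def move(pos, direction):
--     match direction:
--         case "R":
--             return (pos[0] + 1, pos[1])
--         case "L":
--             return (pos[0] - 1, pos[1])
--         case "U":
--             return (pos[0], pos[1] + 1)
--         case "D":
--             return (pos[0], pos[1] - 1)
--
-- def tail_move(tail, head):
--     tail_x, tail_y = tail
--     head_x, head_y = head
--     new_tail = tail
--
--     should_move = abs(tail_x - head_x) > 1 or abs(tail_y - head_y) > 1
--
--     if not should_move: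
--         return tail
--
--     if head_x > tail_x:
--         new_tail = move(new_tail, "R")
--     elif head_x < tail_x:
--         new_tail = move(new_tail, "L")
--
--     if head_y > tail_y:
--         new_tail = move(new_tail, "U")
--     elif head_y < tail_y:
--         new_tail = move(new_tail, "D")
--
--     return new_tail
--
-- def count_visited_squares(moves, tail_len=1):
--     start = (0, 0)
--     visited = set()
--
--     head = start
--     tail = [start] * tail_len
--
--     for (direction, count) in moves:
--         for _ in range(int(count)):
--             head = move(head, direction)
--
--             neighbour = head
--             for i, t in enumerate(tail):
--                 tail[i] = tail_move(t, neighbour)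
--                 neighbour = tail[i]
--
--             visited.add(tail[-1])
--
--     return len(visited)
-- ===== SOURCE B (Python) =====
-- def count_visited_squares(moves, tail_len=1):
--     deltas = {"R": (1, 0), "L": (-1, 0), "U": (0, 1), "D": (0, -1)}
--     # Pass 1: expand moves into the full ordered list of head positions, one per unit step.
--     path = []
--     x, y = 0, 0
--     for direction, count in moves:
--         for _ in range(int(count)):
--             dx, dy = deltas[direction]
--             x, y = x + dx, y + dy
--             path.append((x, y))
--     # Pass 2..: process the rope one knot at a time; each knot follows the previous knot's path.
--     for _ in range(tail_len):
--         prev, path = path, []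
--         tx, ty = 0, 0
--         for hx, hy in prev:
--             ex, ey = hx - tx, hy - ty
--             if abs(ex) > 1 or abs(ey) > 1:
--                 tx += (ex > 0) - (ex < 0)
--                 ty += (ey > 0) - (ey < 0)
--             path.append((tx, ty))
--     return len(set(path))
-- ===== Notes on version B (the rewrite author's own statement) =====
-- stated objective: alternative
-- what changed: A interleaves everything in one per-step loop updating all knots together; B first expands the moves into the full head path, then runs one pass per knot (each knot's whole path computed from the previous knot's path) and counts the distinct positions of the last knot's path.
-- crash fix: When tail_len <= 0 and the moves produce at least one unit step (all stepped directions valid), A raises IndexError on tail[-1]; B returns the number of distinct head positions (the 0-knot rope's tail is the head). — e.g. on count_visited_squares([("R", 2)], 0): A raises IndexError, B returns 2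
import Mathlib
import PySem

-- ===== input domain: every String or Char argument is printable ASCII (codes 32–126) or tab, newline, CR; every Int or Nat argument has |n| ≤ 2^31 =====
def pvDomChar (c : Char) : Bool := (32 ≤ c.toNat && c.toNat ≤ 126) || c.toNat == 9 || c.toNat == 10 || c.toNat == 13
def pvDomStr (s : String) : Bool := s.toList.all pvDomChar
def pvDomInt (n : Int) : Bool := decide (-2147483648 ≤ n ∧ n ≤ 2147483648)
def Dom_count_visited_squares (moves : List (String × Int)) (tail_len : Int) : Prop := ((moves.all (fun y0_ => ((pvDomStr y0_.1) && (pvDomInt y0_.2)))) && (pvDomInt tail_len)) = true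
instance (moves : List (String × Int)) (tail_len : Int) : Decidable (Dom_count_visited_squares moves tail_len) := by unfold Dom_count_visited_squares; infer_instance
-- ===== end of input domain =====

-- B replaces A's single per-step loop (which updates every knot at each head step) by per-knot
-- passes: expand the head path once, then compute each knot's whole path from the previous knot's
-- path, and count the distinct positions on the last knot's path.  Same asymptotic cost.

-- ===== PORT A =====

-- move(pos, direction); on a direction other than R/L/U/D Python returns None (a TypeError follows
-- in tail_move / the tuple unpacking) — such inputs are outside Pre_; the port returns pos there.
def pyMove (pos : Int × Int) (dir : String) : Int × Int :=
  if dir = "R" then (pos.1 + 1, pos.2)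
  else if dir = "L" then (pos.1 - 1, pos.2)
  else if dir = "U" then (pos.1, pos.2 + 1)
  else if dir = "D" then (pos.1, pos.2 - 1)
  else pos

-- tail_move(tail, head)
def pyTailMove (tail head : Int × Int) : Int × Int :=
  if ¬(1 < (tail.1 - head.1).natAbs ∨ 1 < (tail.2 - head.2).natAbs) then tail
  else
    let n1 := if head.1 > tail.1 then pyMove tail "R"
              else if head.1 < tail.1 then pyMove tail "L" else tail
    if head.2 > tail.2 then pyMove n1 "U"
    else if head.2 < tail.2 then pyMove n1 "D" else n1

-- the 'for i, t in enumerate(tail)' loop: update each knot in order, threading the neighbour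
def chainA (nb : Int × Int) : List (Int × Int) → List (Int × Int)
  | [] => []
  | t :: rest => let t' := pyTailMove t nb; t' :: chainA t' rest

-- the 'for _ in range(int(count))' loop; tail[-1] on an empty tail is IndexError (outside Pre_),
-- the port uses getLastD (0,0) there.
def innerA (d : String) : Nat → (Int × Int) → List (Int × Int) → PySem.Set (Int × Int) →
    (Int × Int) × List (Int × Int) × PySem.Set (Int × Int)
  | 0, h, ts, v => (h, ts, v)
  | n + 1, h, ts, v =>
      let h' := pyMove h d
      let ts' := chainA h' ts
      innerA d n h' ts' (PySem.Set.add v (ts'.getLastD (0, 0)))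

def count_visited_squares (moves : List (String × Int)) (tail_len : Int) : Int :=
  let st := moves.foldl
    (fun (s : (Int × Int) × List (Int × Int) × PySem.Set (Int × Int)) dc =>
      innerA dc.1 dc.2.toNat s.1 s.2.1 s.2.2)
    ((0, 0), List.replicate tail_len.toNat (0, 0), PySem.Set.empty)
  PySem.Set.len st.2.2

-- ===== PORT B =====

-- deltas[d]; on an invalid direction Python raises KeyError (only reachable with a positive count,
-- outside Pre_); the port returns (0,0) there.
def deltaB (d : String) : Int × Int :=
  if d = "R" then (1, 0)
  else if d = "L" then (-1, 0)
  else if d = "U" then (0, 1)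
  else if d = "D" then (0, -1)
  else (0, 0)

-- inner 'for _ in range(int(count))' loop of pass 1
def headStepsB (d : String) : Nat → (Int × Int) → List (Int × Int) →
    (Int × Int) × List (Int × Int)
  | 0, p, acc => (p, acc)
  | n + 1, p, acc =>
      let dd := deltaB d
      let p' := (p.1 + dd.1, p.2 + dd.2)
      headStepsB d n p' (acc ++ [p'])

def headPathB (moves : List (String × Int)) : List (Int × Int) :=
  (moves.foldl
    (fun (s : (Int × Int) × List (Int × Int)) dc => headStepsB dc.1 dc.2.toNat s.1 s.2)
    ((0, 0), [])).2

-- (ex > 0) - (ex < 0)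
def sgnB (x : Int) : Int := (if x > 0 then 1 else 0) - (if x < 0 then 1 else 0)

def followB (t h : Int × Int) : Int × Int :=
  let ex := h.1 - t.1
  let ey := h.2 - t.2
  if 1 < ex.natAbs ∨ 1 < ey.natAbs then (t.1 + sgnB ex, t.2 + sgnB ey) else t

-- one per-knot pass: the knot walks the previous knot's path
def knotPassB (prev : List (Int × Int)) : List (Int × Int) :=
  (prev.foldl
    (fun (s : (Int × Int) × List (Int × Int)) h =>
      let t' := followB s.1 h
      (t', s.2 ++ [t']))
    ((0, 0), [])).2

-- 'for _ in range(tail_len)'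
def iterKnotsB : Nat → List (Int × Int) → List (Int × Int)
  | 0, p => p
  | n + 1, p => iterKnotsB n (knotPassB p)

def count_visited_squares_alt (moves : List (String × Int)) (tail_len : Int) : Int :=
  PySem.Set.len (PySem.Set.ofList (iterKnotsB tail_len.toNat (headPathB moves)))

-- ===== PRECONDITION & SPEC =====

-- Pre_ is exactly where Python A returns: every move actually stepped (count > 0) has a valid
-- direction (otherwise move() returns None and a TypeError follows), and either tail_len ≥ 1 or
-- no step is ever taken (otherwise tail[-1] raises IndexError).
def Pre_count_visited_squares (moves : List (String × Int)) (tail_len : Int) : Prop :=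
  (∀ dc ∈ moves, 0 < dc.2 → (dc.1 = "R" ∨ dc.1 = "L" ∨ dc.1 = "U" ∨ dc.1 = "D")) ∧
  (1 ≤ tail_len ∨ ∀ dc ∈ moves, dc.2 ≤ 0)
instance (moves : List (String × Int)) (tail_len : Int) : Decidable (Pre_count_visited_squares moves tail_len) := by unfold Pre_count_visited_squares; infer_instance

def pvWitness_count_visited_squares : (List (String × Int)) × Int := ([("R", 4), ("U", 2)], 2)

-- When tail_len <= 0 and the moves produce at least one unit step (all stepped directions valid),
-- A raises IndexError on tail[-1]; B returns the number of distinct head positions.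
def Raises_count_visited_squares (moves : List (String × Int)) (tail_len : Int) : Prop :=
  tail_len ≤ 0 ∧
  (∀ dc ∈ moves, 0 < dc.2 → (dc.1 = "R" ∨ dc.1 = "L" ∨ dc.1 = "U" ∨ dc.1 = "D")) ∧
  (∃ dc ∈ moves, 0 < dc.2)
instance (moves : List (String × Int)) (tail_len : Int) : Decidable (Raises_count_visited_squares moves tail_len) := by unfold Raises_count_visited_squares; infer_instance
def pvRaiseWitness_count_visited_squares : (List (String × Int)) × Int := ([("R", 2)], 0)
def pvRaiseWitnessOut_count_visited_squares : Int := 2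

def Spec_count_visited_squares (moves : List (String × Int)) (tail_len : Int) (out : Int) : Prop := out = count_visited_squares_alt moves tail_len
instance (moves : List (String × Int)) (tail_len : Int) (out : Int) : Decidable (Spec_count_visited_squares moves tail_len out) := by unfold Spec_count_visited_squares; infer_instance

-- ===== CLAIM (what is proved, stated in full; the proofs are below) =====
def Claim_equal_count_visited_squares : Prop := ∀ (moves : List (String × Int)) (tail_len : Int), Dom_count_visited_squares moves tail_len → Pre_count_visited_squares moves tail_len → Spec_count_visited_squares moves tail_len (count_visited_squares moves tail_len)
def Claim_raises_count_visited_squares : Prop := (∀ (moves : List (String × Int)) (tail_len : Int), Dom_count_visited_squares moves tail_len → Raises_count_visited_squares moves tail_len → ¬ Pre_count_visited_squares moves tail_len) ∧ (Dom_count_visited_squares (pvRaiseWitness_count_visited_squares.1) (pvRaiseWitness_count_visited_squares.2) ∧ Raises_count_visited_squares (pvRaiseWitness_count_visited_squares.1) (pvRaiseWitness_count_visited_squares.2) ∧ count_visited_squares_alt (pvRaiseWitness_count_visited_squares.1) (pvRaiseWitness_count_visited_squares.2) = pvRaiseWitnessOut_count_visited_squares)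

-- ===== LEMMAS AND PROOFS =====

-- pyMove on each literal direction string
theorem pyMove_R (p : Int × Int) : pyMove p "R" = (p.1 + 1, p.2) := by simp [pyMove]
theorem pyMove_L (p : Int × Int) : pyMove p "L" = (p.1 - 1, p.2) := by simp [pyMove]
theorem pyMove_U (p : Int × Int) : pyMove p "U" = (p.1, p.2 + 1) := by simp [pyMove]
theorem pyMove_D (p : Int × Int) : pyMove p "D" = (p.1, p.2 - 1) := by simp [pyMove]

-- A's tail_move and B's sign-based follow rule compute the same position.
theorem tailMove_eq_follow (t h : Int × Int) : pyTailMove t h = followB t h := by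
  rcases t with ⟨tx, ty⟩
  rcases h with ⟨hx, hy⟩
  simp only [pyTailMove, followB, sgnB, pyMove_R, pyMove_L, pyMove_U, pyMove_D]
  split_ifs <;> simp only [Prod.mk.injEq] <;> omega

-- pyMove is a translation by deltaB (for every direction string: the "else" cases agree too).
theorem pyMove_eq_delta (p : Int × Int) (d : String) :
    pyMove p d = (p.1 + (deltaB d).1, p.2 + (deltaB d).2) := by
  simp only [pyMove, deltaB]
  split_ifs <;> simp [Prod.ext_iff] <;> omega

-- proof-side pure head expansion: list of head positions of n unit steps in direction d from p
def headList (d : String) : Nat → (Int × Int) → List (Int × Int)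
  | 0, _ => []
  | n + 1, p =>
      let p' := (p.1 + (deltaB d).1, p.2 + (deltaB d).2)
      p' :: headList d n p'

def headFin (d : String) : Nat → (Int × Int) → (Int × Int)
  | 0, p => p
  | n + 1, p => headFin d n (p.1 + (deltaB d).1, p.2 + (deltaB d).2)

theorem headStepsB_eq (d : String) : ∀ (n : Nat) (p : Int × Int) (acc : List (Int × Int)),
    headStepsB d n p acc = (headFin d n p, acc ++ headList d n p)
  | 0, p, acc => by simp [headStepsB, headFin, headList]
  | n + 1, p, acc => by
      simp only [headStepsB, headFin, headList]
      rw [headStepsB_eq d n]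
      simp

-- proof-side pure head expansion of a whole move list, starting at head position p
def expandM : (Int × Int) → List (String × Int) → List (Int × Int)
  | _, [] => []
  | p, dc :: rest => headList dc.1 dc.2.toNat p ++ expandM (headFin dc.1 dc.2.toNat p) rest

-- proof-side: knots after consuming a head-position list, and the per-step last-knot sequence
def tsAfter : List (Int × Int) → List (Int × Int) → List (Int × Int)
  | [], ts => ts
  | h :: hs, ts => tsAfter hs (chainA h ts)

def lastsSeq : List (Int × Int) → List (Int × Int) → List (Int × Int)
  | [], _ => []
  | h :: hs, ts => let ts' := chainA h ts; ts'.getLastD (0, 0) :: lastsSeq hs ts'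

theorem tsAfter_append (l1 l2 ts : List (Int × Int)) :
    tsAfter (l1 ++ l2) ts = tsAfter l2 (tsAfter l1 ts) := by
  induction l1 generalizing ts with
  | nil => rfl
  | cons h l ih => simp [tsAfter, ih]

theorem lastsSeq_append (l1 l2 ts : List (Int × Int)) :
    lastsSeq (l1 ++ l2) ts = lastsSeq l1 ts ++ lastsSeq l2 (tsAfter l1 ts) := by
  induction l1 generalizing ts with
  | nil => rfl
  | cons h l ih => simp [lastsSeq, tsAfter, ih]

-- A's inner loop = head expansion + knot/visited bookkeeping over it
theorem innerA_eq (d : String) : ∀ (n : Nat) (h : Int × Int) (ts : List (Int × Int))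
    (v : PySem.Set (Int × Int)),
    innerA d n h ts v =
      (headFin d n h, tsAfter (headList d n h) ts,
        (lastsSeq (headList d n h) ts).foldl PySem.Set.add v)
  | 0, h, ts, v => by simp [innerA, headFin, headList, tsAfter, lastsSeq]
  | n + 1, h, ts, v => by
      simp only [innerA, headFin, headList, tsAfter, lastsSeq, List.foldl_cons]
      rw [pyMove_eq_delta, innerA_eq d n]

def headFinM : (Int × Int) → List (String × Int) → (Int × Int)
  | p, [] => p
  | p, dc :: rest => headFinM (headFin dc.1 dc.2.toNat p) rest

-- A's outer loop = expansion of the whole move list + the same bookkeeping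
theorem foldA_eq : ∀ (moves : List (String × Int)) (h : Int × Int)
    (ts : List (Int × Int)) (v : PySem.Set (Int × Int)),
    moves.foldl
      (fun (s : (Int × Int) × List (Int × Int) × PySem.Set (Int × Int)) dc =>
        innerA dc.1 dc.2.toNat s.1 s.2.1 s.2.2) (h, ts, v) =
    (headFinM h moves, tsAfter (expandM h moves) ts,
      (lastsSeq (expandM h moves) ts).foldl PySem.Set.add v) := by
  intro moves
  induction moves with
  | nil => intro h ts v; simp [headFinM, expandM, tsAfter, lastsSeq]
  | cons dc rest ih =>
      intro h ts v
      simp only [List.foldl_cons]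
      rw [innerA_eq dc.1, ih]
      simp only [headFinM, expandM, tsAfter_append, lastsSeq_append, List.foldl_append]

-- B's pass 1 builds exactly the same expansion
theorem headPathB_fold_eq : ∀ (moves : List (String × Int)) (p : Int × Int)
    (acc : List (Int × Int)),
    moves.foldl
      (fun (s : (Int × Int) × List (Int × Int)) dc => headStepsB dc.1 dc.2.toNat s.1 s.2)
      (p, acc) = (headFinM p moves, acc ++ expandM p moves) := by
  intro moves
  induction moves with
  | nil => intro p acc; simp [headFinM, expandM]
  | cons dc rest ih =>
      intro p acc
      simp only [List.foldl_cons]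
      rw [headStepsB_eq dc.1, ih]
      simp [headFinM, expandM]

theorem headPathB_eq (moves : List (String × Int)) :
    headPathB moves = expandM (0, 0) moves := by
  simp [headPathB, headPathB_fold_eq]

-- proof-side: one knot's path along a given head path, and its final position
def fpathP (t0 : Int × Int) : List (Int × Int) → List (Int × Int)
  | [] => []
  | h :: hs => let t' := followB t0 h; t' :: fpathP t' hs

def fpathFin (t0 : Int × Int) : List (Int × Int) → (Int × Int)
  | [] => t0
  | h :: hs => fpathFin (followB t0 h) hs

theorem knotFold_eq : ∀ (hs : List (Int × Int)) (t : Int × Int) (acc : List (Int × Int)),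
    hs.foldl
      (fun (s : (Int × Int) × List (Int × Int)) h =>
        let t' := followB s.1 h
        (t', s.2 ++ [t'])) (t, acc) = (fpathFin t hs, acc ++ fpathP t hs) := by
  intro hs
  induction hs with
  | nil => intro t acc; simp [fpathFin, fpathP]
  | cons h hs ih =>
      intro t acc
      simp only [List.foldl_cons, fpathFin, fpathP]
      rw [ih]
      simp

theorem knotPassB_eq (hs : List (Int × Int)) : knotPassB hs = fpathP (0, 0) hs := by
  simp [knotPassB, knotFold_eq]

-- structural unfolding lemmas
theorem chainA_cons (nb t : Int × Int) (r : List (Int × Int)) :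
    chainA nb (t :: r) = followB t nb :: chainA (followB t nb) r := by
  simp only [chainA]
  rw [tailMove_eq_follow]

theorem lastsSeq_cons (h : Int × Int) (hs ts : List (Int × Int)) :
    lastsSeq (h :: hs) ts = (chainA h ts).getLastD (0, 0) :: lastsSeq hs (chainA h ts) := rfl

theorem fpathP_cons (t0 h : Int × Int) (hs : List (Int × Int)) :
    fpathP t0 (h :: hs) = followB t0 h :: fpathP (followB t0 h) hs := rfl

-- THE interchange lemma: running all knots one head step at a time and reading off the last knot
-- equals peeling one knot off and feeding its whole path to the remaining knots.
theorem lasts_key : ∀ (hs : List (Int × Int)) (t0 : Int × Int) (rest : List (Int × Int)),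
    lastsSeq hs (t0 :: rest) =
      if rest = [] then fpathP t0 hs else lastsSeq (fpathP t0 hs) rest := by
  intro hs
  induction hs with
  | nil => intro t0 rest; cases rest <;> simp [lastsSeq, fpathP]
  | cons h hs ih =>
      intro t0 rest
      cases rest with
      | nil =>
          rw [if_pos rfl, lastsSeq_cons, chainA_cons, fpathP_cons]
          simp only [chainA, List.getLastD_cons, List.getLastD_nil]
          rw [ih (followB t0 h) []]
          simp
      | cons r0 rest' =>
          rw [if_neg (List.cons_ne_nil r0 rest')]
          simp only [lastsSeq_cons, chainA_cons, List.getLastD_cons, fpathP_cons]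
          rw [ih]
          rw [if_neg (List.cons_ne_nil _ _)]

-- last knot of a (k+1)-knot rope = k+1 per-knot passes over the head path
theorem lasts_replicate : ∀ (k : Nat) (hs : List (Int × Int)),
    lastsSeq hs (List.replicate (k + 1) ((0 : Int), (0 : Int))) = iterKnotsB (k + 1) hs := by
  intro k
  induction k with
  | zero =>
      intro hs
      simp only [List.replicate, iterKnotsB, knotPassB_eq]
      rw [lasts_key]
      simp
  | succ k ih =>
      intro hs
      rw [List.replicate_succ, lasts_key]
      have hne : List.replicate (k + 1) ((0 : Int), (0 : Int)) ≠ [] := by simp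
      rw [if_neg hne, ih]
      simp only [iterKnotsB, knotPassB_eq]

theorem expandM_nil_of_nonpos : ∀ (moves : List (String × Int)),
    (∀ dc ∈ moves, dc.2 ≤ 0) → ∀ p, expandM p moves = [] := by
  intro moves
  induction moves with
  | nil => intro _ p; rfl
  | cons dc rest ih =>
      intro hnp p
      have h0 : dc.2.toNat = 0 := by
        have := hnp dc (by simp)
        omega
      simp only [expandM, h0, headList]
      exact ih (fun x hx => hnp x (by simp [hx])) _

theorem iterKnotsB_nil : ∀ (k : Nat), iterKnotsB k [] = [] := by
  intro k
  induction k with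
  | zero => rfl
  | succ k ih => simpa [iterKnotsB, knotPassB] using ih

-- ===== VERDICT (by name: the statement is the Claim_ definition above) =====
theorem count_visited_squares_spec : Claim_equal_count_visited_squares := by
  intro moves tail_len _ hpre
  unfold Spec_count_visited_squares count_visited_squares count_visited_squares_alt
  rw [foldA_eq, headPathB_eq]
  rw [PySem.Set.ofList_eq_foldl]
  rcases hpre with ⟨_, h1 | h2⟩
  · obtain ⟨k, hk⟩ : ∃ k, tail_len.toNat = k + 1 := ⟨tail_len.toNat - 1, by omega⟩
    rw [hk, lasts_replicate]
    rfl
  · rw [expandM_nil_of_nonpos moves h2, iterKnotsB_nil]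
    rfl

theorem count_visited_squares_raises : Claim_raises_count_visited_squares := by
  unfold Claim_raises_count_visited_squares
  constructor
  · intro moves tail_len _ hr hp
    rcases hr with ⟨h0, _, dc, hmem, hpos⟩
    rcases hp with ⟨_, h1 | h2⟩
    · omega
    · exact absurd (h2 dc hmem) (by omega)
  · exact ⟨by decide, by decide, by decide⟩

-- self-check: the recorded raise witness really lies inside Raises_ (read off the theorem above)
theorem count_visited_squares_raises_ok :
    Raises_count_visited_squares pvRaiseWitness_count_visited_squares.1
      pvRaiseWitness_count_visited_squares.2 :=
  count_visited_squares_raises.2.2.1
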